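-- pv_equiv track=rewrite | github.com/Sangam321/DSA-Assignment | Question5/ImpactedDevice.py | get_impacted_devices
-- ===== SOURCE A (Python) =====
-- from collections import deque
--
-- def get_impacted_devices(edges, target_device):
--     graph = {}
--     visited = set()
--     impacted_devices = []
--     for edge in edges:
--         u, v = edge
--         # Add the edge between devices u and v
--         graph.setdefault(u, []).append(v)
--         graph.setdefault(v, []).append(u)
--     queue = deque([target_device])
--     # Mark the target device as visited
--     visited.add(target_device)
--     # Perform breadth-first search traversal
--     while queue:
--         current_device = queue.popleft()
--         if current_device in graph:
--             for neighbor in graph[current_device]: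
--                 if neighbor not in visited:
--                     queue.append(neighbor)
--                     # Mark the neighbor as visited
--                     visited.add(neighbor)
--                     impacted_devices.append(neighbor)
--     return sorted(impacted_devices)
-- ===== SOURCE B (Python) =====
-- def get_impacted_devices(edges, target_device):
--     # Edge-relaxation: repeatedly sweep the edge list, growing the component set.
--     # Each full sweep adds at least one new node until the component is complete,
--     # and there are at most 2*len(edges) nodes besides the target, so 2*len(edges)
--     # sweeps reach the fixed point.
--     comp = {target_device}
--     for _ in range(2 * len(edges)):
--         for u, v in edges:
--             if u in comp:
--                 comp.add(v)
--             if v in comp: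
--                 comp.add(u)
--     return sorted(comp - {target_device})
-- ===== Notes on version B (the rewrite author's own statement) =====
-- stated objective: alternative
-- what changed: Replaces A's adjacency-dictionary plus visited-set FIFO breadth-first search by repeated relaxation sweeps over the raw edge list: the component set grows by propagating membership across each edge until a fixed point, with no graph dict and no queue.
import Mathlib
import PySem

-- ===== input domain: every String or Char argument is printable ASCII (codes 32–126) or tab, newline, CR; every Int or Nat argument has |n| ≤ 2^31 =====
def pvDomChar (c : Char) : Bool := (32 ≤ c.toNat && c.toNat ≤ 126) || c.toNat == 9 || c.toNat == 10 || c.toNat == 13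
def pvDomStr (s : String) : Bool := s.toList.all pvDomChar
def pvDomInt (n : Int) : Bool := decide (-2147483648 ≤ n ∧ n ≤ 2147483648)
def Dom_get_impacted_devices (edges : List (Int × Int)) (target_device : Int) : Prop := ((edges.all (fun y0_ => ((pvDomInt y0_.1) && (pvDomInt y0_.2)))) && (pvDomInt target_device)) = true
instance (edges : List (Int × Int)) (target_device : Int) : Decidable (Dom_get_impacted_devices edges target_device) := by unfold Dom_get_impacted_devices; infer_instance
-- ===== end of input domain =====

-- B replaces A's adjacency-dict + FIFO BFS by repeated relaxation sweeps over the raw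
-- edge list (no graph dictionary, no queue); objective: alternative algorithm.

-- ===== PORT A =====
-- builds the adjacency dict: graph.setdefault(u, []).append(v) = modify u [] (· ++ [v])
def pvBuildGraph (edges : List (Int × Int)) : PySem.Dict Int (List Int) :=
  edges.foldl (fun g e =>
    (g.modify e.1 [] (fun l => l ++ [e.2])).modify e.2 [] (fun l => l ++ [e.1]))
    PySem.Dict.empty

-- the inner 'for neighbor in graph[current_device]' loop
def pvVisit (nbrs : List Int) (q : List Int) (vis : PySem.Set Int) (imp : List Int) :
    List Int × PySem.Set Int × List Int :=
  match nbrs with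
  | [] => (q, vis, imp)
  | n :: rest =>
    if PySem.Set.contains vis n then pvVisit rest q vis imp
    else pvVisit rest (q ++ [n]) (PySem.Set.add vis n) (imp ++ [n])

-- the 'while queue' loop; the fuel argument only makes the recursion structural — the
-- lemma pvBfs_spec below proves 4*|edges|+1 fuel is never exhausted
def pvBfs (graph : PySem.Dict Int (List Int)) :
    Nat → List Int → PySem.Set Int → List Int → PySem.Set Int × List Int
  | 0, _, vis, imp => (vis, imp)
  | fuel + 1, q, vis, imp =>
    match q with
    | [] => (vis, imp)
    | c :: q' =>
      match graph.get? c with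
      | none => pvBfs graph fuel q' vis imp
      | some nbrs =>
        let s := pvVisit nbrs q' vis imp
        pvBfs graph fuel s.1 s.2.1 s.2.2

def get_impacted_devices (edges : List (Int × Int)) (target_device : Int) : List Int :=
  let graph := pvBuildGraph edges
  let r := pvBfs graph (4 * edges.length + 1) [target_device]
             (PySem.Set.add PySem.Set.empty target_device) []
  PySem.List.sorted r.2 (fun x => x) false

-- ===== PORT B =====
-- one edge: 'if u in comp: comp.add(v)' then 'if v in comp: comp.add(u)'
def pvRelax (comp : PySem.Set Int) (e : Int × Int) : PySem.Set Int :=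
  let c := if PySem.Set.contains comp e.1 then PySem.Set.add comp e.2 else comp
  if PySem.Set.contains c e.2 then PySem.Set.add c e.1 else c

-- one full sweep: 'for u, v in edges: …'
def pvSweep (edges : List (Int × Int)) (comp : PySem.Set Int) : PySem.Set Int :=
  edges.foldl pvRelax comp

def get_impacted_devices_alt (edges : List (Int × Int)) (target_device : Int) : List Int :=
  let comp := (List.range (2 * edges.length)).foldl (fun c _ => pvSweep edges c)
      (PySem.Set.ofList [target_device])
  PySem.List.sorted (PySem.Set.diff comp (PySem.Set.ofList [target_device])) (fun x => x) false

-- ===== PRECONDITION & SPEC =====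
def Spec_get_impacted_devices (edges : List (Int × Int)) (target_device : Int) (out : List Int) : Prop := out = get_impacted_devices_alt edges target_device
instance (edges : List (Int × Int)) (target_device : Int) (out : List Int) : Decidable (Spec_get_impacted_devices edges target_device out) := by unfold Spec_get_impacted_devices; infer_instance

-- ===== CLAIM (what is proved, stated in full; the proofs are below) =====
def Claim_equal_get_impacted_devices : Prop := ∀ (edges : List (Int × Int)) (target_device : Int), Dom_get_impacted_devices edges target_device → Spec_get_impacted_devices edges target_device (get_impacted_devices edges target_device)

-- ===== LEMMAS AND PROOFS =====

-- symmetric adjacency given by the edge list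
def pvAdj (edges : List (Int × Int)) (u v : Int) : Prop := (u, v) ∈ edges ∨ (v, u) ∈ edges

-- connectivity to the target
inductive pvReach (edges : List (Int × Int)) (t : Int) : Int → Prop
  | refl : pvReach edges t t
  | tail {u v : Int} : pvReach edges t u → pvAdj edges u v → pvReach edges t v

-- all endpoints occurring in the edge list
def pvNodes (edges : List (Int × Int)) : List Int := edges.flatMap (fun e => [e.1, e.2])

lemma pvAdj_mem_nodes {edges : List (Int × Int)} {u v : Int} (h : pvAdj edges u v) :
    v ∈ pvNodes edges := by
  rcases h with h | h
  · exact List.mem_flatMap.2 ⟨(u, v), h, by simp⟩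
  · exact List.mem_flatMap.2 ⟨(v, u), h, by simp⟩

lemma pvNodes_length (edges : List (Int × Int)) : (pvNodes edges).length = 2 * edges.length := by
  induction edges with
  | nil => rfl
  | cons e rest ih => simp only [pvNodes, List.flatMap_cons] at *; simp [ih]; omega

lemma pvBuildGraph_foldl_mem (l : List (Int × Int)) :
    ∀ (d : PySem.Dict Int (List Int)) (x y : Int),
    y ∈ (l.foldl (fun g e =>
      (g.modify e.1 [] (fun l => l ++ [e.2])).modify e.2 [] (fun l => l ++ [e.1])) d).getD x [] ↔
      y ∈ d.getD x [] ∨ (x, y) ∈ l ∨ (y, x) ∈ l := by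
  induction l with
  | nil => simp
  | cons e rest ih =>
    intro d x y
    rw [List.foldl_cons, ih]
    have hstep : y ∈ ((d.modify e.1 [] (fun l => l ++ [e.2])).modify e.2 []
        (fun l => l ++ [e.1])).getD x [] ↔
        y ∈ d.getD x [] ∨ (x = e.1 ∧ y = e.2) ∨ (x = e.2 ∧ y = e.1) := by
      by_cases hv : x = e.2
      · rw [hv, PySem.Dict.getD_modify_self]
        by_cases hu : e.2 = e.1
        · rw [hu, PySem.Dict.getD_modify_self]
          simp
        · rw [PySem.Dict.getD_modify_of_ne _ _ _ hu]
          simp; tauto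
      · rw [PySem.Dict.getD_modify_of_ne _ _ _ hv]
        by_cases hu : x = e.1
        · rw [hu] at hv ⊢
          rw [PySem.Dict.getD_modify_self]
          simp [hv]
        · rw [PySem.Dict.getD_modify_of_ne _ _ _ hu]
          simp [hu, hv]
    rw [hstep]
    constructor
    · rintro ((h | ⟨h1, h2⟩ | ⟨h1, h2⟩) | h | h)
      · tauto
      · subst h1; subst h2; simp
      · subst h1; subst h2; simp
      · simp [h]
      · simp [h]
    · rintro (h | h | h)
      · tauto
      · rcases List.mem_cons.1 h with h | h
        · left; right; left; constructor <;> (rw [Prod.ext_iff] at h; simp at h; tauto)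
        · tauto
      · rcases List.mem_cons.1 h with h | h
        · left; right; right; constructor <;> (rw [Prod.ext_iff] at h; simp at h; tauto)
        · tauto

lemma pvBuildGraph_mem (edges : List (Int × Int)) (x y : Int) :
    y ∈ (pvBuildGraph edges).getD x [] ↔ pvAdj edges x y := by
  unfold pvBuildGraph pvAdj
  rw [pvBuildGraph_foldl_mem]
  simp [PySem.Dict.empty, pysem]

lemma pvVisit_spec (nbrs : List Int) :
    ∀ (q : List Int) (vis : PySem.Set Int) (imp : List Int),
    ∃ new : List Int,
      pvVisit nbrs q vis imp = (q ++ new, vis ++ new, imp ++ new) ∧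
      (∀ x ∈ new, x ∈ nbrs ∧ x ∉ vis) ∧ new.Nodup ∧
      (∀ x ∈ nbrs, x ∈ vis ++ new) := by
  induction nbrs with
  | nil => intro q vis imp; exact ⟨[], by simp [pvVisit]⟩
  | cons n rest ih =>
    intro q vis imp
    by_cases h : PySem.Set.contains vis n
    · obtain ⟨new, heq, hmem, hnd, hcov⟩ := ih q vis imp
      refine ⟨new, by unfold pvVisit; rw [h]; simpa using heq, ?_, hnd, ?_⟩
      intro x hx
      · obtain ⟨h1, h2⟩ := hmem x hx
        exact ⟨List.mem_cons_of_mem _ h1, h2⟩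
      intro x hx
      rcases List.mem_cons.1 hx with hx | hx
      · subst hx; exact List.mem_append_left _ ((PySem.Set.contains_iff _ _).1 h)
      · exact hcov x hx
    · have hn : n ∉ vis := fun hc => h ((PySem.Set.contains_iff _ _).2 hc)
      have hadd : PySem.Set.add vis n = vis ++ [n] := by
        simp [PySem.Set.add, hn]
      obtain ⟨new, heq, hmem, hnd, hcov⟩ := ih (q ++ [n]) (vis ++ [n]) (imp ++ [n])
      refine ⟨n :: new, ?_, ?_, ?_, ?_⟩
      · have h' : PySem.Set.contains vis n = false := by simpa using h
        unfold pvVisit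
        rw [h', hadd] at *
        simp only [Bool.false_eq_true, if_false, heq]
        simp
      · intro x hx
        rcases List.mem_cons.1 hx with hx | hx
        · subst hx; exact ⟨List.mem_cons_self, hn⟩
        · obtain ⟨h1, h2⟩ := hmem x hx
          exact ⟨List.mem_cons_of_mem _ h1, fun hc => h2 (List.mem_append_left _ hc)⟩
      · refine List.nodup_cons.2 ⟨fun hc => ?_, hnd⟩
        exact (hmem n hc).2 (List.mem_append_right _ (by simp))
      · intro x hx
        rcases List.mem_cons.1 hx with hx | hx
        · subst hx; simp
        · have := hcov x hx
          simpa [List.append_assoc] using this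

lemma pvBfs_spec (edges : List (Int × Int)) (t : Int) :
    ∀ (fuel : Nat) (q : List Int) (vis : PySem.Set Int) (imp : List Int),
    (∀ x ∈ q, x ∈ vis) →
    vis.Nodup →
    vis = t :: imp →
    (∀ x ∈ vis, pvReach edges t x) →
    (∀ x ∈ vis, x ∈ q ∨ ∀ y, pvAdj edges x y → y ∈ vis) →
    q.length + 2 * ((pvNodes edges).toFinset \ vis.toFinset).card ≤ fuel →
    ∃ vis' imp', pvBfs (pvBuildGraph edges) fuel q vis imp = (vis', imp') ∧
      vis' = t :: imp' ∧ vis'.Nodup ∧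
      (∀ x ∈ vis', pvReach edges t x) ∧
      (∀ x ∈ vis', ∀ y, pvAdj edges x y → y ∈ vis') := by
  intro fuel
  induction fuel with
  | zero =>
    intro q vis imp h1 h2 h3 h4 h5 h6
    have hq : q = [] := List.length_eq_zero_iff.1 (by omega)
    subst hq
    refine ⟨vis, imp, rfl, h3, h2, h4, fun x hx y hadj => ?_⟩
    rcases h5 x hx with hq | hcl
    · simp at hq
    · exact hcl y hadj
  | succ f ih =>
    intro q vis imp h1 h2 h3 h4 h5 h6
    cases q with
    | nil =>
      refine ⟨vis, imp, rfl, h3, h2, h4, fun x hx y hadj => ?_⟩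
      rcases h5 x hx with hq | hcl
      · simp at hq
      · exact hcl y hadj
    | cons c q' =>
      cases hg : (pvBuildGraph edges).get? c with
      | none =>
        have hres : pvBfs (pvBuildGraph edges) (f + 1) (c :: q') vis imp =
            pvBfs (pvBuildGraph edges) f q' vis imp := by
          simp only [pvBfs, hg]
        rw [hres]
        have hcl_c : ∀ y, pvAdj edges c y → y ∈ vis := by
          intro y hadj
          have hmem := (pvBuildGraph_mem edges c y).2 hadj
          rw [show (pvBuildGraph edges).getD c [] = [] by simp [PySem.Dict.getD, hg]] at hmem
          simp at hmem
        refine ih q' vis imp (fun x hx => h1 x (List.mem_cons_of_mem _ hx)) h2 h3 h4 ?_ ?_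
        · intro x hx
          rcases h5 x hx with hq | hcl
          · rcases List.mem_cons.1 hq with rfl | hq'
            · exact Or.inr hcl_c
            · exact Or.inl hq'
          · exact Or.inr hcl
        · simp only [List.length_cons] at h6
          omega
      | some nbrs =>
        have hnbrs : (pvBuildGraph edges).getD c [] = nbrs := by simp [PySem.Dict.getD, hg]
        obtain ⟨new, heq, hmem, hnd, hcov⟩ := pvVisit_spec nbrs q' vis imp
        have hres : pvBfs (pvBuildGraph edges) (f + 1) (c :: q') vis imp =
            pvBfs (pvBuildGraph edges) f (q' ++ new) (vis ++ new) (imp ++ new) := by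
          simp only [pvBfs, hg, heq]
        rw [hres]
        have hA : ∀ x ∈ new, pvAdj edges c x := by
          intro x hx
          exact (pvBuildGraph_mem edges c x).1 (hnbrs ▸ (hmem x hx).1)
        have hcvis : c ∈ vis := h1 c List.mem_cons_self
        refine ih (q' ++ new) (vis ++ new) (imp ++ new) ?_ ?_ ?_ ?_ ?_ ?_
        · intro x hx
          rcases List.mem_append.1 hx with hx | hx
          · exact List.mem_append_left _ (h1 x (List.mem_cons_of_mem _ hx))
          · exact List.mem_append_right _ hx
        · exact List.Nodup.append h2 hnd (fun x hxv hxn => (hmem x hxn).2 hxv)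
        · rw [h3]; rfl
        · intro x hx
          rcases List.mem_append.1 hx with hx | hx
          · exact h4 x hx
          · exact pvReach.tail (h4 c hcvis) (hA x hx)
        · intro x hx
          rcases List.mem_append.1 hx with hx | hx
          · rcases h5 x hx with hq | hcl
            · rcases List.mem_cons.1 hq with rfl | hq'
              · refine Or.inr (fun y hadj => ?_)
                have := (pvBuildGraph_mem edges x y).2 hadj
                rw [hnbrs] at this
                exact hcov y this
              · exact Or.inl (List.mem_append_left _ hq')
            · exact Or.inr (fun y hadj => List.mem_append_left _ (hcl y hadj))
          · exact Or.inl (List.mem_append_right _ hx)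
        · have hsubset : new.toFinset ⊆ (pvNodes edges).toFinset \ vis.toFinset := by
            intro x hx
            rw [List.mem_toFinset] at hx
            rw [Finset.mem_sdiff, List.mem_toFinset, List.mem_toFinset]
            exact ⟨pvAdj_mem_nodes (hA x hx), (hmem x hx).2⟩
          have hsd : (pvNodes edges).toFinset \ (vis ++ new).toFinset =
              ((pvNodes edges).toFinset \ vis.toFinset) \ new.toFinset := by
            ext x
            simp only [Finset.mem_sdiff, List.toFinset_append, Finset.mem_union]
            tauto
          have hcard1 : (((pvNodes edges).toFinset \ vis.toFinset) \ new.toFinset).card =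
              ((pvNodes edges).toFinset \ vis.toFinset).card - new.toFinset.card := by
            rw [Finset.card_sdiff, Finset.inter_eq_left.2 hsubset]
          have hcard2 : new.toFinset.card = new.length := List.toFinset_card_of_nodup hnd
          have hcard3 : new.toFinset.card ≤ ((pvNodes edges).toFinset \ vis.toFinset).card :=
            Finset.card_le_card hsubset
          rw [List.length_append, hsd, hcard1, hcard2]
          simp only [List.length_cons] at h6
          omega

-- A's impacted list: Nodup, members = reachable minus target
lemma pvA_char (edges : List (Int × Int)) (t : Int) :
    ∃ imp : List Int, get_impacted_devices edges t = PySem.List.sorted imp (fun x => x) false ∧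
      imp.Nodup ∧ (∀ x, x ∈ imp ↔ pvReach edges t x ∧ x ≠ t) := by
  have hvis0 : PySem.Set.add PySem.Set.empty t = [t] := by
    simp [PySem.Set.add, PySem.Set.empty]
  obtain ⟨vis', imp', hrun, hv, hnd, hre, hcl⟩ :=
    pvBfs_spec edges t (4 * edges.length + 1) [t] (PySem.Set.add PySem.Set.empty t) []
      (by rw [hvis0]; exact fun x hx => hx)
      (by rw [hvis0]; simp)
      (by rw [hvis0])
      (by rw [hvis0]; intro x hx; simp at hx; subst hx; exact pvReach.refl)
      (by intro x hx; exact Or.inl (hvis0 ▸ hx))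
      (by
        rw [hvis0]
        have hc1 : ((pvNodes edges).toFinset \ ([t] : List Int).toFinset).card ≤
            (pvNodes edges).toFinset.card := Finset.card_le_card (Finset.sdiff_subset)
        have hc2 := List.toFinset_card_le (pvNodes edges)
        rw [pvNodes_length] at hc2
        simp only [List.length_cons, List.length_nil]
        omega)
  have htnotin : t ∉ imp' := by
    rw [hv] at hnd
    exact (List.nodup_cons.1 hnd).1
  refine ⟨imp', ?_, ?_, ?_⟩
  · show PySem.List.sorted (pvBfs (pvBuildGraph edges) (4 * edges.length + 1) [t]
      (PySem.Set.add PySem.Set.empty t) []).2 (fun x => x) false = _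
    rw [hrun]
  · rw [hv] at hnd
    exact (List.nodup_cons.1 hnd).2
  · intro x
    constructor
    · intro hx
      have hxv : x ∈ vis' := by rw [hv]; exact List.mem_cons_of_mem _ hx
      exact ⟨hre x hxv, fun hxt => htnotin (hxt ▸ hx)⟩
    · rintro ⟨hr, hne⟩
      have hxv : x ∈ vis' := by
        induction hr with
        | refl => rw [hv]; exact List.mem_cons_self
        | @tail u v hu hadj ihh =>
          by_cases hut : u = t
          · refine hcl u ?_ v hadj
            rw [hv, hut]
            exact List.mem_cons_self
          · exact hcl u (ihh hut) v hadj
      rw [hv] at hxv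
      rcases List.mem_cons.1 hxv with rfl | hx
      · exact absurd rfl hne
      · exact hx

-- ---- B side ----

lemma pvAdd_prefix (c : PySem.Set Int) (x : Int) : ∃ tl, PySem.Set.add c x = c ++ tl := by
  by_cases h : x ∈ c
  · exact ⟨[], by simp [PySem.Set.add, h]⟩
  · exact ⟨[x], by simp [PySem.Set.add, h]⟩

lemma pvRelax_prefix (c : PySem.Set Int) (e : Int × Int) : ∃ tl, pvRelax c e = c ++ tl := by
  unfold pvRelax
  by_cases h1 : PySem.Set.contains c e.1 <;> simp only [h1, if_true, if_false, Bool.false_eq_true]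
  · obtain ⟨t1, ht1⟩ := pvAdd_prefix c e.2
    by_cases h2 : PySem.Set.contains (PySem.Set.add c e.2) e.2 <;>
      simp only [h2, if_true, if_false, Bool.false_eq_true]
    · obtain ⟨t2, ht2⟩ := pvAdd_prefix (PySem.Set.add c e.2) e.1
      exact ⟨t1 ++ t2, by rw [ht2, ht1, List.append_assoc]⟩
    · exact ⟨t1, ht1⟩
  · by_cases h2 : PySem.Set.contains c e.2 <;>
      simp only [h2, if_true, if_false, Bool.false_eq_true]
    · exact pvAdd_prefix c e.1
    · exact ⟨[], by simp⟩

lemma pvSweep_prefix (edges : List (Int × Int)) : ∀ (c : PySem.Set Int),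
    ∃ tl, pvSweep edges c = c ++ tl := by
  induction edges with
  | nil => exact fun c => ⟨[], by simp [pvSweep]⟩
  | cons e rest ih =>
    intro c
    obtain ⟨t1, ht1⟩ := pvRelax_prefix c e
    obtain ⟨t2, ht2⟩ := ih (pvRelax c e)
    exact ⟨t1 ++ t2, by
      show (e :: rest).foldl pvRelax c = _
      rw [List.foldl_cons]
      show pvSweep rest (pvRelax c e) = _
      rw [ht2, ht1, List.append_assoc]⟩

lemma pvSweep_mono {edges : List (Int × Int)} {c : PySem.Set Int} {x : Int}
    (h : x ∈ c) : x ∈ pvSweep edges c := by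
  obtain ⟨tl, htl⟩ := pvSweep_prefix edges c
  rw [htl]; exact List.mem_append_left _ h

-- invariant carried along the sweeps
def pvInv (edges : List (Int × Int)) (t : Int) (c : PySem.Set Int) : Prop :=
  c.Nodup ∧ t ∈ c ∧ (∀ x ∈ c, pvReach edges t x) ∧ (∀ x ∈ c, x = t ∨ x ∈ pvNodes edges)

lemma pvRelax_mem_left {c : PySem.Set Int} {e : Int × Int} (h : e.1 ∈ c) :
    e.2 ∈ pvRelax c e := by
  have h1 : PySem.Set.contains c e.1 = true := (PySem.Set.contains_iff _ _).2 h
  unfold pvRelax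
  rw [h1]
  simp only [if_true]
  by_cases h2 : PySem.Set.contains (PySem.Set.add c e.2) e.2 = true <;>
    simp only [h2, if_true, Bool.false_eq_true, if_false]
  · exact (PySem.Set.mem_add _ _ _).2 (Or.inl ((PySem.Set.mem_add _ _ _).2 (Or.inr rfl)))
  · exact (PySem.Set.mem_add _ _ _).2 (Or.inr rfl)

lemma pvRelax_mem_right {c : PySem.Set Int} {e : Int × Int} (h : e.2 ∈ c) :
    e.1 ∈ pvRelax c e := by
  unfold pvRelax
  by_cases h1 : PySem.Set.contains c e.1 = true <;>
    simp only [h1, if_true, Bool.false_eq_true, if_false]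
  · have h2 : PySem.Set.contains (PySem.Set.add c e.2) e.2 = true :=
      (PySem.Set.contains_iff _ _).2 ((PySem.Set.mem_add _ _ _).2 (Or.inr rfl))
    rw [h2]
    simp only [if_true]
    exact (PySem.Set.mem_add _ _ _).2 (Or.inr rfl)
  · have h2 : PySem.Set.contains c e.2 = true := (PySem.Set.contains_iff _ _).2 h
    rw [h2]
    simp only [if_true]
    exact (PySem.Set.mem_add _ _ _).2 (Or.inr rfl)

lemma pvRelax_inv {edges : List (Int × Int)} {t : Int} {c : PySem.Set Int} {e : Int × Int}
    (he : e ∈ edges) (h : pvInv edges t c) : pvInv edges t (pvRelax c e) := by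
  have he' : (e.1, e.2) ∈ edges := by simpa using he
  obtain ⟨hnd, ht, hre, hnode⟩ := h
  have hn2 : e.2 ∈ pvNodes edges := pvAdj_mem_nodes (u := e.1) (Or.inl he')
  have hn1 : e.1 ∈ pvNodes edges := pvAdj_mem_nodes (u := e.2) (Or.inr he')
  simp only [pvRelax]
  split_ifs with h1 h2 h2
  · have hre2 : pvReach edges t e.2 :=
      pvReach.tail (hre _ ((PySem.Set.contains_iff _ _).1 h1)) (Or.inl he')
    refine ⟨PySem.Set.nodup_add _ _ (PySem.Set.nodup_add _ _ hnd), ?_, ?_, ?_⟩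
    · exact (PySem.Set.mem_add _ _ _).2 (Or.inl ((PySem.Set.mem_add _ _ _).2 (Or.inl ht)))
    · intro x hx
      rcases (PySem.Set.mem_add _ _ _).1 hx with hx | rfl
      · rcases (PySem.Set.mem_add _ _ _).1 hx with hx | rfl
        · exact hre x hx
        · exact hre2
      · exact pvReach.tail hre2 (Or.inr he')
    · intro x hx
      rcases (PySem.Set.mem_add _ _ _).1 hx with hx | rfl
      · rcases (PySem.Set.mem_add _ _ _).1 hx with hx | rfl
        · exact hnode x hx
        · exact Or.inr hn2
      · exact Or.inr hn1
  · exact absurd ((PySem.Set.contains_iff _ _).2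
      ((PySem.Set.mem_add _ _ _).2 (Or.inr rfl))) h2
  · refine ⟨PySem.Set.nodup_add _ _ hnd, (PySem.Set.mem_add _ _ _).2 (Or.inl ht), ?_, ?_⟩
    · intro x hx
      rcases (PySem.Set.mem_add _ _ _).1 hx with hx | rfl
      · exact hre x hx
      · exact pvReach.tail (hre _ ((PySem.Set.contains_iff _ _).1 h2)) (Or.inr he')
    · intro x hx
      rcases (PySem.Set.mem_add _ _ _).1 hx with hx | rfl
      · exact hnode x hx
      · exact Or.inr hn1
  · exact ⟨hnd, ht, hre, hnode⟩

lemma pvFoldl_inv {edges : List (Int × Int)} {t : Int} :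
    ∀ (l : List (Int × Int)) (c : PySem.Set Int), (∀ e ∈ l, e ∈ edges) →
      pvInv edges t c → pvInv edges t (l.foldl pvRelax c) := by
  intro l
  induction l with
  | nil => exact fun c _ h => h
  | cons e rest ih =>
    intro c hsub h
    rw [List.foldl_cons]
    exact ih _ (fun x hx => hsub x (List.mem_cons_of_mem _ hx))
      (pvRelax_inv (hsub e List.mem_cons_self) h)

lemma pvSweep_inv {edges : List (Int × Int)} {t : Int} {c : PySem.Set Int}
    (h : pvInv edges t c) : pvInv edges t (pvSweep edges c) := by
  exact pvFoldl_inv edges c (fun _ h => h) h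

lemma pvSweep_adds {edges : List (Int × Int)} {u v : Int} {c : PySem.Set Int}
    (he : (u, v) ∈ edges) :
    (u ∈ c → v ∈ pvSweep edges c) ∧ (v ∈ c → u ∈ pvSweep edges c) := by
  obtain ⟨l₁, l₂, hsplit⟩ := List.append_of_mem he
  have hdec : pvSweep edges c = pvSweep l₂ (pvRelax (pvSweep l₁ c) (u, v)) := by
    unfold pvSweep
    rw [hsplit, List.foldl_append, List.foldl_cons]
  constructor
  · intro hu
    rw [hdec]
    exact pvSweep_mono (pvRelax_mem_left (e := (u, v)) (pvSweep_mono hu))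
  · intro hv
    rw [hdec]
    exact pvSweep_mono (pvRelax_mem_right (e := (u, v)) (pvSweep_mono hv))

lemma pvInv_length {edges : List (Int × Int)} {t : Int} {c : PySem.Set Int}
    (h : pvInv edges t c) : c.length ≤ 1 + 2 * edges.length := by
  obtain ⟨hnd, _, _, hnode⟩ := h
  have hsub : c.toFinset ⊆ insert t (pvNodes edges).toFinset := by
    intro x hx
    rcases hnode x (List.mem_toFinset.1 hx) with rfl | hx'
    · exact Finset.mem_insert_self _ _
    · exact Finset.mem_insert_of_mem (List.mem_toFinset.2 hx')
  calc c.length = c.toFinset.card := (List.toFinset_card_of_nodup hnd).symm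
    _ ≤ (insert t (pvNodes edges).toFinset).card := Finset.card_le_card hsub
    _ ≤ (pvNodes edges).toFinset.card + 1 := Finset.card_insert_le _ _
    _ ≤ (pvNodes edges).length + 1 := by
        have := List.toFinset_card_le (pvNodes edges); omega
    _ = 1 + 2 * edges.length := by rw [pvNodes_length]; omega

lemma pvRange_foldl_iterate (f : PySem.Set Int → PySem.Set Int) :
    ∀ (n : Nat) (c : PySem.Set Int), (List.range n).foldl (fun c _ => f c) c = f^[n] c := by
  intro n c
  induction n with
  | zero => simp
  | succ m ih =>
    rw [List.range_succ, List.foldl_append, ih, List.foldl_cons, List.foldl_nil,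
      Function.iterate_succ_apply']

lemma pvIter_inv (edges : List (Int × Int)) (t : Int) (n : Nat) {c : PySem.Set Int}
    (h : pvInv edges t c) : pvInv edges t ((pvSweep edges)^[n] c) := by
  induction n with
  | zero => exact h
  | succ m ih => rw [Function.iterate_succ_apply']; exact pvSweep_inv ih

lemma pvIter_grow (edges : List (Int × Int)) (c : PySem.Set Int) (n : Nat) :
    c.length + n ≤ ((pvSweep edges)^[n] c).length ∨
      pvSweep edges ((pvSweep edges)^[n] c) = (pvSweep edges)^[n] c := by
  induction n with
  | zero => left; simp
  | succ m ih =>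
    rcases ih with hlen | hfix
    · obtain ⟨tl, htl⟩ := pvSweep_prefix edges ((pvSweep edges)^[m] c)
      cases tl with
      | nil =>
        right
        rw [Function.iterate_succ_apply', htl, List.append_nil, htl, List.append_nil]
      | cons a tl' =>
        left
        rw [Function.iterate_succ_apply', htl, List.length_append]
        simp only [List.length_cons]
        omega
    · right
      rw [Function.iterate_succ_apply', hfix, hfix]

lemma pvFinal_fixed (edges : List (Int × Int)) (t : Int) {c : PySem.Set Int}
    (h : pvInv edges t c) (hl : 1 ≤ c.length) :
    pvSweep edges ((pvSweep edges)^[2 * edges.length] c) = (pvSweep edges)^[2 * edges.length] c := by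
  rcases pvIter_grow edges c (2 * edges.length) with hlen | hfix
  · have hN := pvInv_length (pvIter_inv edges t (2 * edges.length) h)
    obtain ⟨tl, htl⟩ := pvSweep_prefix edges ((pvSweep edges)^[2 * edges.length] c)
    have hN1 : pvInv edges t (pvSweep edges ((pvSweep edges)^[2 * edges.length] c)) :=
      pvSweep_inv (pvIter_inv edges t (2 * edges.length) h)
    have hlen1 := pvInv_length hN1
    rw [htl] at hlen1 ⊢
    rw [List.length_append] at hlen1
    have : tl.length = 0 := by omega
    rw [List.length_eq_zero_iff.1 this, List.append_nil]
  · exact hfix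

lemma pvB_char (edges : List (Int × Int)) (t : Int) :
    ∃ d : List Int, get_impacted_devices_alt edges t = PySem.List.sorted d (fun x => x) false ∧
      d.Nodup ∧ (∀ x, x ∈ d ↔ pvReach edges t x ∧ x ≠ t) := by
  have hof : PySem.Set.ofList [t] = [t] := PySem.Set.ofList_eq_self_of_nodup _ (by simp)
  have hinv0 : pvInv edges t (PySem.Set.ofList [t]) := by
    rw [hof]
    exact ⟨by simp, by simp, fun x hx => by simp at hx; subst hx; exact pvReach.refl,
      fun x hx => by simp at hx; exact Or.inl hx⟩
  have hfix := pvFinal_fixed edges t hinv0 (by rw [hof]; simp)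
  have hinvF := pvIter_inv edges t (2 * edges.length) hinv0
  set F := (pvSweep edges)^[2 * edges.length] (PySem.Set.ofList [t]) with hF
  have hmemF : ∀ x, x ∈ F ↔ pvReach edges t x := by
    intro x
    constructor
    · exact hinvF.2.2.1 x
    · intro hr
      induction hr with
      | refl => exact hinvF.2.1
      | @tail u v hu hadj ihh =>
        rcases hadj with he | he
        · have := (pvSweep_adds (c := F) he).1 ihh
          rwa [hfix] at this
        · have := (pvSweep_adds (c := F) he).2 ihh
          rwa [hfix] at this
  refine ⟨PySem.Set.diff F (PySem.Set.ofList [t]), ?_, ?_, ?_⟩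
  · unfold get_impacted_devices_alt
    rw [pvRange_foldl_iterate]
  · exact PySem.Set.nodup_diff _ _ hinvF.1
  · intro x
    rw [PySem.Set.mem_diff, hmemF, hof]
    simp

-- ===== VERDICT (by name: the statement is the Claim_ definition above) =====
theorem get_impacted_devices_spec : Claim_equal_get_impacted_devices := by
  intro edges t _
  unfold Spec_get_impacted_devices
  obtain ⟨ia, ha, hna, hma⟩ := pvA_char edges t
  obtain ⟨ib, hb, hnb, hmb⟩ := pvB_char edges t
  rw [ha, hb]
  exact PySem.List.sorted_eq_sorted_of_perm _ _ _ (fun a b h => h)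
    ((List.perm_ext_iff_of_nodup hna hnb).2 (fun x => by rw [hma, hmb]))
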